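-- pv_equiv track=rewrite | github.com/ItsMysterix/Slurpy | backend/slurpy/domain/care/service.py | _canon_theme
-- ===== SOURCE A (Python) =====
-- from typing import List, Dict, Optional, Sequence, TypedDict
--
-- THEME_ALIAS: Dict[str, str] = {
--     "ongoing_anxiety": "anxiety",
--     "ongoing_depression": "depression",
--     "ongoing_anger": "anger",
--     "ongoing_relationships": "relationships",
--     "ongoing_trauma": "trauma",
--     "work_stress": "anxiety",
--     "self_esteem": "depression",
-- }
--
-- def _canon_theme(themes: Sequence[str]) -> Optional[str]:
--     if not themes:
--         return None
--     norm: List[str] = []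
--     for t in themes:
--         if not t:
--             continue
--         tt = str(t).strip().lower().replace("ongoing_", "")
--         tt = THEME_ALIAS.get(t, tt)
--         norm.append(tt)
--     for k in ("anxiety", "depression", "anger", "relationships", "trauma"):
--         if k in norm:
--             return k
--     return None
-- ===== SOURCE B (Python) =====
-- from typing import Dict, List, Optional, Sequence
--
-- THEME_ALIAS: Dict[str, str] = {
--     "ongoing_anxiety": "anxiety",
--     "ongoing_depression": "depression",
--     "ongoing_anger": "anger",
--     "ongoing_relationships": "relationships",
--     "ongoing_trauma": "trauma",
--     "work_stress": "anxiety",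
--     "self_esteem": "depression",
-- }
--
-- _RANK: Dict[str, int] = {"anxiety": 0, "depression": 1, "anger": 2, "relationships": 3, "trauma": 4}
-- _CANON: List[str] = ["anxiety", "depression", "anger", "relationships", "trauma"]
--
-- def _canon_theme(themes: Sequence[str]) -> Optional[str]:
--     best = 5
--     for t in themes:
--         if not t:
--             continue
--         tt = THEME_ALIAS.get(t, str(t).strip().lower().replace("ongoing_", ""))
--         r = _RANK.get(tt, 5)
--         if r < best:
--             best = r
--     return _CANON[best] if best < 5 else None
-- ===== Notes on version B (the rewrite author's own statement) =====
-- stated objective: simpler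
-- what changed: Replaces A's two-phase structure (build a normalized list, then scan it once per canonical key) with a single pass over themes that keeps the minimum priority rank and indexes the canonical table at the end; no intermediate list is built.
import Mathlib
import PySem

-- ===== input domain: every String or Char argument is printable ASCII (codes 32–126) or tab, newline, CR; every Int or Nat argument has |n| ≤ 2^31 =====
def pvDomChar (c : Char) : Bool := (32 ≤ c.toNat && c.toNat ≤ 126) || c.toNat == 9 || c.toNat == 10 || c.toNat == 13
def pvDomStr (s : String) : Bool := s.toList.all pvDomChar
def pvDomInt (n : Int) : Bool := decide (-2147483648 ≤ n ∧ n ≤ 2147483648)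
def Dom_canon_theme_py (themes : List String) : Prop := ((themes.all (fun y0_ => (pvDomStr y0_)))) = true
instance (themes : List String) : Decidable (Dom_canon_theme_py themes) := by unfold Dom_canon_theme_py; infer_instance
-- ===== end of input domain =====

-- B replaces A's build-a-normalized-list-then-scan-five-keys structure by a single pass
-- keeping the minimum priority rank (simpler: one loop, no intermediate list).

-- ===== PORT A =====
def themeAlias : PySem.Dict String String := PySem.Dict.ofList
  [("ongoing_anxiety", "anxiety"), ("ongoing_depression", "depression"),
   ("ongoing_anger", "anger"), ("ongoing_relationships", "relationships"),
   ("ongoing_trauma", "trauma"), ("work_stress", "anxiety"), ("self_esteem", "depression")]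

-- tt = THEME_ALIAS.get(t, str(t).strip().lower().replace("ongoing_", ""))
def pvNormalize (t : String) : String :=
  themeAlias.getD t (PySem.Str.replace (PySem.Str.lower (PySem.Str.strip t)) "ongoing_" "")

def canon_theme_py (themes : List String) : Option String :=
  if themes = [] then none
  else
    let norm : List String := themes.foldl
      (fun acc t => if t = "" then acc else acc ++ [pvNormalize t]) []
    if norm.contains "anxiety" then some "anxiety"
    else if norm.contains "depression" then some "depression"
    else if norm.contains "anger" then some "anger"
    else if norm.contains "relationships" then some "relationships"
    else if norm.contains "trauma" then some "trauma"
    else none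

-- ===== PORT B =====
def rankDict : PySem.Dict String Int := PySem.Dict.ofList
  [("anxiety", 0), ("depression", 1), ("anger", 2), ("relationships", 3), ("trauma", 4)]

def canonList : List String := ["anxiety", "depression", "anger", "relationships", "trauma"]

def canon_theme_py_alt (themes : List String) : Option String :=
  let best : Int := themes.foldl
    (fun best t =>
      if t = "" then best
      else
        let r := rankDict.getD (pvNormalize t) 5
        if r < best then r else best) 5
  if best < 5 then PySem.List.pyGet? canonList best else none

-- ===== PRECONDITION & SPEC =====
def Spec_canon_theme_py (themes : List String) (out : Option String) : Prop := out = canon_theme_py_alt themes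
instance (themes : List String) (out : Option String) : Decidable (Spec_canon_theme_py themes out) := by unfold Spec_canon_theme_py; infer_instance

-- ===== CLAIM (what is proved, stated in full; the proofs are below) =====
def Claim_equal_canon_theme_py : Prop := ∀ (themes : List String), Dom_canon_theme_py themes → Spec_canon_theme_py themes (canon_theme_py themes)

-- ===== LEMMAS AND PROOFS =====

def pvRank (s : String) : Int := rankDict.getD s 5

def pvMinStep (b : Int) (s : String) : Int := if pvRank s < b then pvRank s else b

def pvNormList : List String → List String
  | [] => []
  | t :: ts => if t = "" then pvNormList ts else pvNormalize t :: pvNormList ts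

theorem pvRank_eq (s : String) : pvRank s =
    if s = "anxiety" then 0 else if s = "depression" then 1 else if s = "anger" then 2
    else if s = "relationships" then 3 else if s = "trauma" then 4 else 5 := by
  simp [pvRank, rankDict, PySem.Dict.ofList, PySem.Dict.getD_eq_get?_getD, PySem.Dict.update,
    PySem.Dict.get?_insert, PySem.Dict.get?_empty]
  split_ifs <;> simp_all

theorem pvRank_nonneg (s : String) : 0 ≤ pvRank s := by
  rw [pvRank_eq]; split_ifs <;> norm_num

theorem pvAfold (l : List String) (acc : List String) :
    l.foldl (fun acc t => if t = "" then acc else acc ++ [pvNormalize t]) acc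
      = acc ++ pvNormList l := by
  induction l generalizing acc with
  | nil => simp [pvNormList]
  | cons t ts ih =>
    by_cases h : t = "" <;> simp [pvNormList, h, ih]

theorem pvBfold (l : List String) (b : Int) :
    l.foldl (fun best t =>
      if t = "" then best
      else
        let r := rankDict.getD (pvNormalize t) 5
        if r < best then r else best) b
      = (pvNormList l).foldl pvMinStep b := by
  induction l generalizing b with
  | nil => simp [pvNormList]
  | cons t ts ih =>
    by_cases h : t = "" <;> simp [pvNormList, h, ih, pvMinStep, pvRank]

theorem pvMin_le_init (n : List String) (b : Int) : n.foldl pvMinStep b ≤ b := by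
  induction n generalizing b with
  | nil => simp
  | cons s ss ih =>
    refine le_trans (ih _) ?_
    simp only [pvMinStep]; split_ifs with h <;> omega

theorem pvMin_le_mem (n : List String) (b : Int) (s : String) (hs : s ∈ n) :
    n.foldl pvMinStep b ≤ pvRank s := by
  induction n generalizing b with
  | nil => cases hs
  | cons x xs ih =>
    rcases List.mem_cons.mp hs with h | h
    · subst h
      refine le_trans (pvMin_le_init xs _) ?_
      simp only [pvMinStep]; split_ifs with h <;> omega
    · exact ih _ h

theorem pvMin_lower (n : List String) (b c : Int) (hb : c ≤ b)
    (h : ∀ s ∈ n, c ≤ pvRank s) : c ≤ n.foldl pvMinStep b := by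
  induction n generalizing b with
  | nil => simpa
  | cons x xs ih =>
    refine ih _ ?_ (fun s hs => h s (List.mem_cons_of_mem _ hs))
    simp only [pvMinStep]; split_ifs with hx
    · exact h x List.mem_cons_self
    · exact hb

theorem pvMin_attain (n : List String) (b : Int) :
    n.foldl pvMinStep b = b ∨ ∃ s ∈ n, n.foldl pvMinStep b = pvRank s := by
  induction n generalizing b with
  | nil => left; rfl
  | cons x xs ih =>
    rcases ih (pvMinStep b x) with h | ⟨s, hs, h⟩
    · simp only [List.foldl_cons] at *
      rw [h]; simp only [pvMinStep]; split_ifs with hx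
      · right; exact ⟨x, List.mem_cons_self, rfl⟩
      · left; rfl
    · right; exact ⟨s, List.mem_cons_of_mem _ hs, by simpa using h⟩

-- rank r < 5 is attained only by the r-th canonical key
theorem pvRank_eq_key (s : String) (r : Int) (hr : pvRank s = r) :
    (r = 0 → s = "anxiety") ∧ (r = 1 → s = "depression") ∧ (r = 2 → s = "anger") ∧
    (r = 3 → s = "relationships") ∧ (r = 4 → s = "trauma") := by
  rw [pvRank_eq] at hr
  split_ifs at hr <;> subst hr <;> simp_all

theorem pvChain (n : List String) :
    (if n.contains "anxiety" then some "anxiety"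
     else if n.contains "depression" then some "depression"
     else if n.contains "anger" then some "anger"
     else if n.contains "relationships" then some "relationships"
     else if n.contains "trauma" then some "trauma"
     else none)
    = (if n.foldl pvMinStep 5 < 5 then PySem.List.pyGet? canonList (n.foldl pvMinStep 5) else none) := by
  simp only [List.contains_iff_mem]
  set m := n.foldl pvMinStep 5 with hm
  have h0 : 0 ≤ m := pvMin_lower n 5 0 (by norm_num) (fun s _ => pvRank_nonneg s)
  have h5 : m ≤ 5 := pvMin_le_init n 5
  have hrank : ∀ k : String, k ∈ n → m ≤ pvRank k := fun k hk => pvMin_le_mem n 5 k hk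
  have hattain : m = 5 ∨ ∃ s ∈ n, m = pvRank s := pvMin_attain n 5
  by_cases ha : "anxiety" ∈ n
  · have : m ≤ 0 := by simpa [pvRank_eq] using hrank _ ha
    have hm0 : m = 0 := le_antisymm this h0
    simp [ha, hm0, canonList, PySem.List.pyGet?, PySem.List.pyIdx?]
  · have hna : ∀ s ∈ n, pvRank s ≠ 0 := fun s hs h =>
      ha ((pvRank_eq_key s 0 h).1 rfl ▸ hs)
    by_cases hd : "depression" ∈ n
    · have : m ≤ 1 := by simpa [pvRank_eq] using hrank _ hd
      have hm1 : m = 1 := by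
        rcases hattain with h | ⟨s, hs, h⟩
        · omega
        · have := hna s hs; have := pvRank_nonneg s; omega
      simp [ha, hd, hm1, canonList, PySem.List.pyGet?, PySem.List.pyIdx?]
    · have hnd : ∀ s ∈ n, pvRank s ≠ 1 := fun s hs h =>
        hd ((pvRank_eq_key s 1 h).2.1 rfl ▸ hs)
      by_cases hg : "anger" ∈ n
      · have : m ≤ 2 := by simpa [pvRank_eq] using hrank _ hg
        have hm2 : m = 2 := by
          rcases hattain with h | ⟨s, hs, h⟩
          · omega
          · have := hna s hs; have := hnd s hs; have := pvRank_nonneg s; omega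
        simp [ha, hd, hg, hm2, canonList, PySem.List.pyGet?, PySem.List.pyIdx?]
      · have hng : ∀ s ∈ n, pvRank s ≠ 2 := fun s hs h =>
          hg ((pvRank_eq_key s 2 h).2.2.1 rfl ▸ hs)
        by_cases hr : "relationships" ∈ n
        · have : m ≤ 3 := by simpa [pvRank_eq] using hrank _ hr
          have hm3 : m = 3 := by
            rcases hattain with h | ⟨s, hs, h⟩
            · omega
            · have := hna s hs; have := hnd s hs; have := hng s hs; have := pvRank_nonneg s; omega
          simp [ha, hd, hg, hr, hm3, canonList, PySem.List.pyGet?, PySem.List.pyIdx?]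
        · have hnr : ∀ s ∈ n, pvRank s ≠ 3 := fun s hs h =>
            hr ((pvRank_eq_key s 3 h).2.2.2.1 rfl ▸ hs)
          by_cases ht : "trauma" ∈ n
          · have : m ≤ 4 := by simpa [pvRank_eq] using hrank _ ht
            have hm4 : m = 4 := by
              rcases hattain with h | ⟨s, hs, h⟩
              · omega
              · have := hna s hs; have := hnd s hs; have := hng s hs; have := hnr s hs
                have := pvRank_nonneg s; omega
            simp [ha, hd, hg, hr, ht, hm4, canonList, PySem.List.pyGet?, PySem.List.pyIdx?]
          · have hnt : ∀ s ∈ n, pvRank s ≠ 4 := fun s hs h =>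
              ht ((pvRank_eq_key s 4 h).2.2.2.2 rfl ▸ hs)
            have hm5 : m = 5 := by
              rcases hattain with h | ⟨s, hs, h⟩
              · exact h
              · have := hna s hs; have := hnd s hs; have := hng s hs; have := hnr s hs
                have := hnt s hs
                have h5' : pvRank s ≤ 5 := by rw [pvRank_eq]; split_ifs <;> norm_num
                have := pvRank_nonneg s; omega
            simp [ha, hd, hg, hr, ht, hm5]

-- ===== VERDICT (by name: the statement is the Claim_ definition above) =====
theorem canon_theme_py_spec : Claim_equal_canon_theme_py := by
  intro themes _
  unfold Spec_canon_theme_py canon_theme_py canon_theme_py_alt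
  rw [pvBfold]
  by_cases h : themes = []
  · subst h; simp [pvNormList]
  · simp only [h, if_false]
    rw [pvAfold]
    simpa using pvChain (pvNormList themes)
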